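-- pv_equiv track=rewrite | github.com/egorvts/Kattis | Pivot/slow_solution.py | solution
-- ===== SOURCE A (Python) =====
-- def solution(nums: list) -> int:
--     outp = 0
--     for i in range(len(nums)):
--         num = nums[i]
--         nums_before = nums[:i]
--         nums_after = nums[i+1:]
--         if all(map(lambda x: x <= num, nums_before)) and all(map(lambda x: x > num, nums_after)):
--             outp += 1
--     return outp
-- ===== SOURCE B (Python) =====
-- def solution(nums: list) -> int:
--     # One right-to-left pass builds suffix minima; one left-to-right pass with a
--     # running prefix maximum checks each index in O(1): O(n) total vs A's O(n^2).
--     n = len(nums)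
--     suf = [None] * n          # suf[i] = min(nums[i+1:]) or None
--     m = None
--     for i in range(n - 1, -1, -1):
--         suf[i] = m
--         m = nums[i] if m is None else min(m, nums[i])
--     outp = 0
--     pm = None                 # max(nums[:i]) or None
--     for i, x in enumerate(nums):
--         if (pm is None or pm <= x) and (suf[i] is None or suf[i] > x):
--             outp += 1
--         pm = x if pm is None else max(pm, x)
--     return outp
-- ===== Notes on version B (the rewrite author's own statement) =====
-- stated objective: faster
-- what changed: Replaced A's per-index slicing and full rescans of the prefix and suffix by one right-to-left pass computing suffix minima and one left-to-right pass with a running prefix maximum, checking each index in O(1).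
import Mathlib
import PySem

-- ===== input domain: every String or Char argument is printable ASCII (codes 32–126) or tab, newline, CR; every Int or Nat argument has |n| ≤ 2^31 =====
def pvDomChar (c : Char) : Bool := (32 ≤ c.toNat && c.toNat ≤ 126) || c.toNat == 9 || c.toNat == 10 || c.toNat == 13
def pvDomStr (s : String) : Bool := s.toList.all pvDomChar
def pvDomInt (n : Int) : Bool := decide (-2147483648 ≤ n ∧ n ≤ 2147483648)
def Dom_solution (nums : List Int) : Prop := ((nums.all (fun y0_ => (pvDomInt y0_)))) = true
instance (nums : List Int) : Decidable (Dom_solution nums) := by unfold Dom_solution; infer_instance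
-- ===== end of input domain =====

-- B replaces A's per-index slice-and-scan (O(n^2)) by one suffix-minima pass plus one
-- prefix-maximum pass (O(n)); objective: faster.


-- ===== PORT A =====
def solution (nums : List Int) : Int :=
  (PySem.List.pyRange 0 (nums.length : Int) 1).foldl
    (fun outp i =>
      let num := PySem.List.pyGetD nums i 0
      let nums_before := PySem.List.slice nums none (some i)
      let nums_after := PySem.List.slice nums (some (i + 1)) none
      if nums_before.all (fun x => decide (x ≤ num)) && nums_after.all (fun x => decide (x > num))
      then outp + 1 else outp) 0

-- ===== PORT B =====
-- right-to-left pass: (min of the whole list, list whose entry i is min of nums[i+1:])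
def sufScan : List Int → Option Int × List (Option Int)
  | [] => (none, [])
  | x :: xs =>
    let r := sufScan xs
    (some (match r.1 with | none => x | some v => min v x), r.1 :: r.2)

def solution_alt (nums : List Int) : Int :=
  ((nums.zip (sufScan nums).2).foldl
    (fun st p =>
      let ok := (match st.2 with | none => true | some m => decide (m ≤ p.1)) &&
                (match p.2 with | none => true | some s => decide (s > p.1))
      (if ok then st.1 + 1 else st.1,
       some (match st.2 with | none => p.1 | some m => max m p.1)))
    (0, none)).1

-- ===== PRECONDITION & SPEC =====
def Spec_solution (nums : List Int) (out : Int) : Prop := out = solution_alt nums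
instance (nums : List Int) (out : Int) : Decidable (Spec_solution nums out) := by unfold Spec_solution; infer_instance

-- ===== CLAIM (what is proved, stated in full; the proofs are below) =====
def Claim_equal_solution : Prop := ∀ (nums : List Int), Dom_solution nums → Spec_solution nums (solution nums)

-- ===== LEMMAS AND PROOFS =====

-- running-maximum helpers (proof-side reference semantics)
def pmOk : Option Int → Int → Bool
  | none, _ => true
  | some m, x => decide (m ≤ x)

def pmUpd : Option Int → Int → Int
  | none, x => x
  | some m, x => max m x

-- reference count: pm is the running maximum of the already-seen prefix
def cnt : Option Int → List Int → Int
  | _, [] => 0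
  | pm, x :: xs =>
      (if pmOk pm x && xs.all (fun y => decide (x < y)) then 1 else 0) + cnt (some (pmUpd pm x)) xs

def lmax (pre : List Int) : Option Int := pre.foldl (fun a y => some (pmUpd a y)) none

theorem pmOk_foldl (l : List Int) : ∀ (pm : Option Int) (x : Int),
    pmOk (l.foldl (fun a y => some (pmUpd a y)) pm) x = (pmOk pm x && l.all (fun y => decide (y ≤ x))) := by
  induction l with
  | nil => intro pm x; simp
  | cons y t ih =>
      intro pm x
      simp only [List.foldl_cons, List.all_cons, ih]
      cases pm with
      | none =>
          simp only [pmOk, pmUpd, Bool.true_and]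
          rfl
      | some m =>
          simp only [pmOk, pmUpd]
          by_cases h1 : m ≤ x <;> by_cases h2 : y ≤ x <;>
            simp [h1, h2]

theorem sufScan_fst (l : List Int) (x : Int) :
    (match (sufScan l).1 with | none => true | some s => decide (s > x)) =
      l.all (fun y => decide (y > x)) := by
  induction l with
  | nil => simp [sufScan]
  | cons y t ih =>
      simp only [sufScan, List.all_cons, ← ih]
      cases h : (sufScan t).1 with
      | none => simp
      | some v =>
          simp only []
          by_cases h1 : x < y <;> by_cases h2 : x < v <;>
            simp [h1, h2, gt_iff_lt]

theorem condA_count : ∀ (xs pre : List Int),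
    ((List.range' pre.length xs.length).countP (fun k =>
        ((pre ++ xs).take k).all (fun x => decide (x ≤ (pre ++ xs).getD k 0)) &&
        ((pre ++ xs).drop (k+1)).all (fun x => decide (x > (pre ++ xs).getD k 0))) : Int)
      = cnt (lmax pre) xs := by
  intro xs
  induction xs with
  | nil => intro pre; simp [cnt]
  | cons x t ih =>
      intro pre
      rw [List.length_cons, List.range'_succ, List.countP_cons]
      have htake : List.take pre.length (pre ++ x :: t) = pre := by simp
      have hget : (pre ++ x :: t).getD pre.length 0 = x := by
        simp [List.getD_eq_getElem?_getD]
      have hdrop : List.drop (pre.length + 1) (pre ++ x :: t) = t := by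
        rw [show pre ++ x :: t = (pre ++ [x]) ++ t by simp,
            show pre.length + 1 = (pre ++ [x]).length by simp, List.drop_left]
      have hpm : pmOk (lmax pre) x = pre.all (fun y => decide (y ≤ x)) := by
        rw [lmax, pmOk_foldl]; rfl
      have htail : ((List.range' (pre.length + 1) t.length).countP (fun k =>
          ((pre ++ x :: t).take k).all (fun y => decide (y ≤ (pre ++ x :: t).getD k 0)) &&
          ((pre ++ x :: t).drop (k+1)).all (fun y => decide (y > (pre ++ x :: t).getD k 0))) : Int)
          = cnt (some (pmUpd (lmax pre) x)) t := by
        have hl : lmax (pre ++ [x]) = some (pmUpd (lmax pre) x) := by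
          simp [lmax, List.foldl_append]
        rw [show pre ++ x :: t = (pre ++ [x]) ++ t by simp,
            show pre.length + 1 = (pre ++ [x]).length by simp, ih (pre ++ [x]), hl]
      push_cast
      rw [htail, cnt]
      simp only [htake, hget, hdrop, ← hpm]
      by_cases hc : (pmOk (lmax pre) x && t.all (fun y => decide (x < y))) = true
      · simp only [gt_iff_lt, hc, if_true]; ring
      · simp only [gt_iff_lt, hc]; ring

theorem alt_loop : ∀ (xs : List Int) (pm : Option Int) (c : Int),
    ((xs.zip (sufScan xs).2).foldl
      (fun st p =>
        let ok := (match st.2 with | none => true | some m => decide (m ≤ p.1)) &&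
                  (match p.2 with | none => true | some s => decide (s > p.1))
        (if ok then st.1 + 1 else st.1,
         some (match st.2 with | none => p.1 | some m => max m p.1)))
      (c, pm)).1 = c + cnt pm xs := by
  intro xs
  induction xs with
  | nil => intro pm c; simp [cnt]
  | cons x t ih =>
      intro pm c
      have hz : (x :: t).zip (sufScan (x :: t)).2 = (x, (sufScan t).1) :: t.zip (sufScan t).2 := by
        simp [sufScan]
      have hsuf := sufScan_fst t x
      rw [hz, List.foldl_cons]
      cases pm with
      | none =>
          simp only [ih, cnt, pmOk, pmUpd, Bool.true_and, hsuf]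
          by_cases hc : (t.all fun y => decide (x < y)) = true
          · simp only [hc, if_true]; omega
          · simp only [hc, if_false, Bool.false_eq_true]; omega
      | some m =>
          simp only [ih, cnt, pmOk, pmUpd, hsuf]
          by_cases h1 : (m ≤ x)
          · by_cases hc : (t.all fun y => decide (x < y)) = true <;>
              simp only [h1, hc, decide_true, Bool.and_false, Bool.and_true,
                if_true, if_false, Bool.false_eq_true] <;> omega
          · simp only [h1, decide_false, Bool.false_and, if_false, Bool.false_eq_true]; omega

theorem solution_eq_cnt (nums : List Int) : solution nums = cnt none nums := by
  unfold solution
  rw [PySem.List.pyRange_one]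
  simp only [sub_zero, Int.toNat_natCast, List.foldl_map, zero_add]
  have hcong : ∀ k ∈ List.range nums.length, ∀ (acc : ℤ),
      (if ((PySem.List.slice nums none (some (k:Int))).all
              (fun x => decide (x ≤ PySem.List.pyGetD nums (k:Int) 0)) &&
           (PySem.List.slice nums (some ((k:Int) + 1)) none).all
              (fun x => decide (x > PySem.List.pyGetD nums (k:Int) 0)))
       then acc + 1 else acc)
      = (if ((nums.take k).all (fun x => decide (x ≤ nums.getD k 0)) &&
             (nums.drop (k+1)).all (fun x => decide (x > nums.getD k 0)))
         then acc + 1 else acc) := by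
    intro k _ acc
    rw [show (some ((k:Int) + 1)) = some (((k+1 : Nat) : Int)) by push_cast; rfl,
        PySem.List.slice_from_natCast]
    simp [PySem.List.pyGetD_natCast, PySem.List.slice_to_natCast]
  rw [PySem.List.foldl_congr_mem' _ _ (fun (acc : Int) (k : Nat) =>
      if ((nums.take k).all (fun x => decide (x ≤ nums.getD k 0)) &&
          (nums.drop (k+1)).all (fun x => decide (x > nums.getD k 0)))
      then acc + 1 else acc) _ hcong]
  rw [PySem.List.foldl_if_add_one]
  have h := condA_count nums []
  simp only [List.nil_append, List.length_nil, lmax, List.foldl_nil] at h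
  rw [List.range_eq_range', zero_add]
  exact h

-- ===== VERDICT (by name: the statement is the Claim_ definition above) =====
theorem solution_spec : Claim_equal_solution := by
  intro nums _
  unfold Spec_solution solution_alt
  rw [solution_eq_cnt, alt_loop, zero_add]
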